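-- pv_equiv track=rewrite | github.com/Ju-l-e-s/P2_scrapping_books | main.py | extract_number
-- ===== SOURCE A (Python) =====
-- def extract_number(text):
--     """
--     Extrait le premier nombre trouvé dans une chaîne de caractères.
--     """
--     number = ''
--     for char in text:
--         if char.isdigit():
--             number += char
--         elif number:
--             break  # Arrête la boucle une fois le nombre terminé
--     return number if number else '0'
-- ===== SOURCE B (Python) =====
-- def extract_number(text):
--     tokens = ''.join(c if c.isdigit() else ' ' for c in text).split()
--     return tokens[0] if tokens else '0'
-- ===== Notes on version B (the rewrite author's own statement) =====
-- stated objective: alternative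
-- what changed: B replaces A's stateful accumulate-and-break scan by a tokenization: map every non-digit character to a space, split the whole string into whitespace-separated tokens (the maximal digit runs), and return the first token, or '0' if there is none.
import Mathlib
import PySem

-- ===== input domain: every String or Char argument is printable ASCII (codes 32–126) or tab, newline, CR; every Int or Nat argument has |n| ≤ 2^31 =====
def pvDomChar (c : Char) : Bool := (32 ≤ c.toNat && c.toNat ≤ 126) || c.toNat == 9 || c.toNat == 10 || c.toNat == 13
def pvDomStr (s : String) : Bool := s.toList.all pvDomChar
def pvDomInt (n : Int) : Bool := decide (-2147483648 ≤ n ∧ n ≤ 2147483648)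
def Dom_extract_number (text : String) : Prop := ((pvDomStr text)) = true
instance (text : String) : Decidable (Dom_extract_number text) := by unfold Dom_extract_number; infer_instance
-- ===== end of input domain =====

-- B replaces A's accumulate-and-break scan by a tokenization: map non-digits to spaces, split(), take the first token (alternative decomposition; same cost).

-- ===== PORT A =====
-- the for-loop with break: state is the accumulated `number`
def extractLoopA : List Char → List Char → List Char
  | [], number => number
  | c :: cs, number =>
    if PySem.Chars.isdigit c then extractLoopA cs (number ++ [c])
    else if number ≠ [] then number
    else extractLoopA cs number

def extract_number (text : String) : String :=
  let number := extractLoopA text.toList []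
  if number ≠ [] then String.ofList number else "0"

-- ===== PORT B =====
-- ''.join(c if c.isdigit() else ' ' for c in text).split(); tokens[0] if tokens else '0'
def extract_number_alt (text : String) : String :=
  let tokens := PySem.Str.split₀
    (String.ofList (text.toList.map (fun c => if PySem.Chars.isdigit c then c else ' ')))
  match tokens with
  | t :: _ => t
  | [] => "0"

-- ===== PRECONDITION & SPEC =====
def Spec_extract_number (text : String) (out : String) : Prop := out = extract_number_alt text
instance (text : String) (out : String) : Decidable (Spec_extract_number text out) := by unfold Spec_extract_number; infer_instance

-- ===== CLAIM =====
def Claim_equal_extract_number : Prop := ∀ (text : String), Dom_extract_number text → Spec_extract_number text (extract_number text)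

-- ===== LEMMAS AND PROOFS =====
theorem extractLoopA_nonempty (cs : List Char) (acc : List Char) (h : acc ≠ []) :
    extractLoopA cs acc = acc ++ cs.takeWhile (fun c => PySem.Chars.isdigit c) := by
  induction cs generalizing acc with
  | nil => simp [extractLoopA]
  | cons c cs ih =>
    by_cases hd : PySem.Chars.isdigit c
    · simp [extractLoopA, hd, ih (acc ++ [c]) (by simp)]
    · simp [extractLoopA, hd, h]

theorem extractLoopA_nil (cs : List Char) :
    extractLoopA cs [] =
      (cs.dropWhile (fun c => !PySem.Chars.isdigit c)).takeWhile (fun c => PySem.Chars.isdigit c) := by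
  induction cs with
  | nil => simp [extractLoopA]
  | cons c cs ih =>
    by_cases hd : PySem.Chars.isdigit c
    · simp [extractLoopA, hd, extractLoopA_nonempty cs [c] (by simp), List.dropWhile]
    · simp [extractLoopA, hd, ih, List.dropWhile]

theorem not_isspace_of_isdigit (c : Char) (h : PySem.Chars.isdigit c = true) :
    PySem.Chars.isspace c = false := by
  simp only [PySem.Chars.isdigit, Bool.and_eq_true, decide_eq_true_eq] at h
  have h1 : 48 ≤ c.toNat := h.1
  have h2 : c.toNat ≤ 57 := h.2
  simp only [PySem.Chars.isspace, Bool.or_eq_false_iff, Bool.and_eq_false_iff,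
    decide_eq_false_iff_not]
  omega

-- split₀.go prepends acc.reverse to its result
theorem go_acc (s cur : List Char) (acc : List (List Char)) :
    PySem.Chars.split₀.go s cur acc = acc.reverse ++ PySem.Chars.split₀.go s cur [] := by
  induction s generalizing cur acc with
  | nil =>
    by_cases hc : cur.isEmpty
    · simp [PySem.Chars.split₀.go, hc]
    · simp [PySem.Chars.split₀.go, hc]
  | cons c rest ih =>
    by_cases hs : PySem.Chars.isspace c
    · by_cases hc : cur.isEmpty
      · simp only [PySem.Chars.split₀.go, hs, hc, if_true]
        exact ih [] acc
      · simp only [PySem.Chars.split₀.go, hs, hc, if_true, Bool.false_eq_true, if_false]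
        rw [ih [] (cur.reverse :: acc), ih [] [cur.reverse]]
        simp
    · simp only [PySem.Chars.split₀.go, hs, Bool.false_eq_true, if_false]
      exact ih (c :: cur) acc

-- inside a digit run: the head token is the pending run plus the remaining digits
theorem go_run (cs cur : List Char) (hcur : cur ≠ []) :
    (PySem.Chars.split₀.go
        (cs.map (fun c => if PySem.Chars.isdigit c then c else ' ')) cur []).head? =
      some (cur.reverse ++ cs.takeWhile (fun c => PySem.Chars.isdigit c)) := by
  induction cs generalizing cur with
  | nil => simp [PySem.Chars.split₀.go, List.isEmpty_iff, hcur]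
  | cons c rest ih =>
    by_cases hd : PySem.Chars.isdigit c
    · simp only [List.map_cons, hd, if_true, PySem.Chars.split₀.go,
        not_isspace_of_isdigit c hd, Bool.false_eq_true, if_false]
      rw [ih (c :: cur) (by simp)]
      simp [List.takeWhile, hd]
    · simp only [List.map_cons, hd, Bool.false_eq_true, if_false, PySem.Chars.split₀.go,
        show PySem.Chars.isspace ' ' = true by decide, if_true, List.isEmpty_iff, hcur]
      rw [go_acc _ [] [cur.reverse]]
      simp [List.takeWhile, hd]

-- head of the token list of the mapped string = the first digit run (none if no digit)
theorem split₀_head (cs : List Char) :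
    (PySem.Chars.split₀ (cs.map (fun c => if PySem.Chars.isdigit c then c else ' '))).head? =
      (if (cs.dropWhile (fun c => !PySem.Chars.isdigit c)) = [] then none
       else some ((cs.dropWhile (fun c => !PySem.Chars.isdigit c)).takeWhile
                    (fun c => PySem.Chars.isdigit c))) := by
  show (PySem.Chars.split₀.go _ [] []).head? = _
  induction cs with
  | nil => simp [PySem.Chars.split₀.go]
  | cons c rest ih =>
    by_cases hd : PySem.Chars.isdigit c
    · simp only [List.map_cons, hd, if_true, PySem.Chars.split₀.go,
        not_isspace_of_isdigit c hd, Bool.false_eq_true, if_false]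
      rw [go_run rest [c] (by simp)]
      simp [List.dropWhile, hd]
    · simp only [List.map_cons, hd, Bool.false_eq_true, if_false, PySem.Chars.split₀.go,
        show PySem.Chars.isspace ' ' = true by decide, if_true, List.isEmpty_nil]
      rw [ih]
      simp [List.dropWhile, hd]

-- ===== VERDICT =====
theorem extract_number_spec : Claim_equal_extract_number := by
  intro text _
  unfold Spec_extract_number extract_number extract_number_alt
  simp only [extractLoopA_nil, PySem.Str.split₀, String.toList_ofList]
  have h := split₀_head text.toList
  cases hdw : text.toList.dropWhile (fun c => !PySem.Chars.isdigit c) with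
  | nil =>
    rw [hdw] at h
    simp only [if_true] at h
    cases hgo : PySem.Chars.split₀
        (List.map (fun c => if PySem.Chars.isdigit c then c else ' ') text.toList) with
    | nil => simp
    | cons t ts => rw [hgo] at h; simp at h
  | cons x xs =>
    have hx : PySem.Chars.isdigit x = true := by
      have := List.head_dropWhile_not (p := fun c => !PySem.Chars.isdigit c)
        (l := text.toList) (by rw [hdw]; simp)
      simp only [hdw, List.head_cons] at this
      simpa using this
    rw [hdw] at h
    simp only [if_false, reduceCtorEq] at h
    cases hgo : PySem.Chars.split₀
        (List.map (fun c => if PySem.Chars.isdigit c then c else ' ') text.toList) with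
    | nil => rw [hgo] at h; simp at h
    | cons t ts =>
      rw [hgo] at h
      simp only [List.head?_cons, Option.some.injEq] at h
      simp [List.takeWhile, hx, h]
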